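-- pv_equiv track=rewrite | github.com/ShinWon-Chul/AlgorithmWithPython | programmers/연습문제/level2/할인 행사(Counter, 단순 구현).py | solution
-- ===== SOURCE A (Python) =====
-- from collections import Counter
--
-- def solution(want, number, discount):
--     answer = 0
--     d = {k: v for k, v in zip(want, number)}
--
--     for i in range(len(discount)):
--         temp_arr = discount[i:i+10]
--         c = Counter(temp_arr)
--
--         for k, v in d.items():
--             if c[k] >= d[k]:
--                 continue
--             else:
--                 break
--         else:
--             answer += 1
--     return answer
-- ===== SOURCE B (Python) =====
-- def solution(want, number, discount):
--     need = dict(zip(want, number))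
--     n = len(discount)
--     cnt = {k: 0 for k in need}
--     for s in discount[:10]:
--         if s in cnt:
--             cnt[s] += 1
--     matched = sum(1 for k, v in need.items() if cnt[k] >= v)
--     answer = 1 if n > 0 and matched == len(need) else 0
--     for i in range(1, n):
--         out = discount[i - 1]
--         if out in cnt:
--             if cnt[out] == need[out]:
--                 matched -= 1
--             cnt[out] -= 1
--         j = i + 9
--         if j < n:
--             x = discount[j]
--             if x in cnt:
--                 cnt[x] += 1
--                 if cnt[x] == need[x]:
--                     matched += 1
--         if matched == len(need):
--             answer += 1
--     return answer
-- ===== Notes on version B (the rewrite author's own statement) =====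
-- stated objective: faster
-- what changed: A rebuilds a Counter over discount[i:i+10] and rescans all wanted keys for every window; B builds the need dict once, counts only the first window, then slides the window in O(1) amortized per step by decrementing the outgoing item and incrementing the incoming one while maintaining a matched-key counter updated exactly at threshold crossings.
import Mathlib
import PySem

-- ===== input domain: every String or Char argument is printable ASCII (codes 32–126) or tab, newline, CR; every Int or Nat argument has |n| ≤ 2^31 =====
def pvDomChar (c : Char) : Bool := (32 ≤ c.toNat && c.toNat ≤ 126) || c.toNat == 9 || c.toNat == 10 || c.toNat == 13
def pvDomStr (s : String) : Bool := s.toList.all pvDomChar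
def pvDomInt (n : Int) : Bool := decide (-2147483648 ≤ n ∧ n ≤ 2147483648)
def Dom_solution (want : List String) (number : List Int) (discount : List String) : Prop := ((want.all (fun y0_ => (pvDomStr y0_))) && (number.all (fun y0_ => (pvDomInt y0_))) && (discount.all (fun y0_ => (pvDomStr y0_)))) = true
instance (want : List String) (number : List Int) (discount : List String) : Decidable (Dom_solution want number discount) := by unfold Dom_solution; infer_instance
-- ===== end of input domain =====

-- B replaces A's per-window Counter rebuild (O(n·(m+10))) with one sliding window and a
-- matched-key counter updated at threshold crossings (O(n+m)); return values agree everywhere.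

-- ===== PORT A =====
-- inner 'for k, v in d.items(): if c[k] >= d[k]: continue else: break / else:' — the for-else
-- succeeds iff every key passes; c[k] is Counter access (default 0), d[k] has k ∈ d so getD is exact
def checkItemsA (c d : PySem.Dict String Int) : List (String × Int) → Bool
  | [] => true
  | (k, _) :: rest => if c.getD k 0 ≥ d.getD k 0 then checkItemsA c d rest else false

def solution (want : List String) (number : List Int) (discount : List String) : Int :=
  let d : PySem.Dict String Int :=
    (want.zip number).foldl (fun d kv => d.insert kv.1 kv.2) PySem.Dict.empty
  (PySem.List.pyRange 0 (PySem.List.len discount) 1).foldl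
    (fun answer i =>
      let temp_arr := PySem.List.slice discount (some i) (some (i + 10))
      let c := PySem.Dict.counter temp_arr
      if checkItemsA c d d.items then answer + 1 else answer) 0

-- ===== PORT B =====
-- one loop step of Source B: remove discount[i-1] from the window, add discount[i+9] if it exists,
-- keep 'matched' = number of satisfied keys, count the window when matched == len(need)
def solAltStep (need : PySem.Dict String Int) (discount : List String) (n : Int)
    (st : PySem.Dict String Int × Int × Int) (i : Int) : PySem.Dict String Int × Int × Int :=
  let cnt := st.1
  let matched := st.2.1
  let answer := st.2.2
  let out := PySem.List.pyGetD discount (i - 1) ""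
  let p1 : PySem.Dict String Int × Int :=
    if cnt.contains out then
      (cnt.insert out (cnt.getD out 0 - 1),
       if cnt.getD out 0 = need.getD out 0 then matched - 1 else matched)
    else (cnt, matched)
  let j := i + 9
  let p2 : PySem.Dict String Int × Int :=
    if j < n then
      let x := PySem.List.pyGetD discount j ""
      if p1.1.contains x then
        let c2 := p1.1.insert x (p1.1.getD x 0 + 1)
        (c2, if c2.getD x 0 = need.getD x 0 then p1.2 + 1 else p1.2)
      else p1
    else p1
  (p2.1, p2.2, if p2.2 = (need.items.length : Int) then answer + 1 else answer)

def solution_alt (want : List String) (number : List Int) (discount : List String) : Int :=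
  let need : PySem.Dict String Int :=
    (want.zip number).foldl (fun d kv => d.insert kv.1 kv.2) PySem.Dict.empty
  let n : Int := PySem.List.len discount
  let cnt0 : PySem.Dict String Int :=
    need.keys.foldl (fun d k => d.insert k 0) PySem.Dict.empty
  let cnt1 :=
    (PySem.List.slice discount none (some 10)).foldl
      (fun c s => if c.contains s then c.insert s (c.getD s 0 + 1) else c) cnt0
  let matched : Int :=
    need.items.foldl (fun acc kv => if cnt1.getD kv.1 0 ≥ kv.2 then acc + 1 else acc) 0
  let answer : Int := if 0 < n ∧ matched = (need.items.length : Int) then 1 else 0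
  let fin := (PySem.List.pyRange 1 n 1).foldl (solAltStep need discount n)
      (cnt1, matched, answer)
  fin.2.2

-- ===== PRECONDITION & SPEC =====
def Spec_solution (want : List String) (number : List Int) (discount : List String) (out : Int) : Prop := out = solution_alt want number discount
instance (want : List String) (number : List Int) (discount : List String) (out : Int) : Decidable (Spec_solution want number discount out) := by unfold Spec_solution; infer_instance

-- ===== CLAIM (what is proved, stated in full; the proofs are below) =====
def Claim_equal_solution : Prop := ∀ (want : List String) (number : List Int) (discount : List String), Dom_solution want number discount → Spec_solution want number discount (solution want number discount)

-- ===== LEMMAS AND PROOFS =====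

def pvWin (D : List String) (i : Nat) : List String := (D.drop i).take 10
def pvMid (D : List String) (i : Nat) : List String := (D.drop (i + 1)).take 9

def pvMC (need : PySem.Dict String Int) (w : List String) : Int :=
  (need.items.countP (fun kv => decide (kv.2 ≤ ((w.count kv.1 : Nat) : Int))) : Int)

def pvInv (need : PySem.Dict String Int) (w : List String) (cnt : PySem.Dict String Int) : Prop :=
  (∀ k, cnt.contains k = need.contains k) ∧
  (∀ k, k ∈ need.keys → cnt.getD k 0 = ((w.count k : Nat) : Int))

theorem checkItemsA_eq_all (c d : PySem.Dict String Int) (l : List (String × Int)) :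
    checkItemsA c d l = l.all (fun kv => decide (d.getD kv.1 0 ≤ c.getD kv.1 0)) := by
  induction l with
  | nil => rfl
  | cons kv rest ih =>
    obtain ⟨k, v⟩ := kv
    simp only [checkItemsA, ih, List.all_cons]
    split_ifs with h
    · simp [h]
    · simp [h]

theorem pvCountP_same (l : List (String × Int)) (p q : String × Int → Bool)
    (hag : ∀ kv ∈ l, p kv = q kv) : l.countP q = l.countP p := by
  induction l with
  | nil => rfl
  | cons kv rest ih =>
    simp only [List.countP_cons, hag kv (by simp), ih (fun a ha => hag a (by simp [ha]))]

theorem pvCountP_flip (l : List (String × Int)) (hnd : (l.map Prod.fst).Nodup)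
    (kv0 : String × Int) (h0 : kv0 ∈ l) (p q : String × Int → Bool)
    (hag : ∀ kv ∈ l, kv.1 ≠ kv0.1 → p kv = q kv) :
    (l.countP q : Int) =
      (l.countP p : Int) + ((if q kv0 then 1 else 0) - (if p kv0 then 1 else 0)) := by
  induction l with
  | nil => simp at h0
  | cons kv rest ih =>
    simp only [List.map_cons, List.nodup_cons] at hnd
    rcases List.mem_cons.mp h0 with h | h
    · subst h
      have hsame : rest.countP q = rest.countP p := by
        apply pvCountP_same
        intro a ha
        exact hag a (by simp [ha]) (by
          intro hc
          exact hnd.1 (by rw [← hc]; exact List.mem_map_of_mem ha))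
      simp only [List.countP_cons, hsame]
      push_cast
      split_ifs <;> omega
    · have hne : kv.1 ≠ kv0.1 := by
        intro hc
        exact hnd.1 (by rw [hc]; exact List.mem_map_of_mem h)
      have := ih hnd.2 h (fun a ha hne' => hag a (by simp [ha]) hne')
      simp only [List.countP_cons, hag kv (by simp) hne]
      push_cast at this
      split_ifs at this ⊢ <;> omega

theorem pvInitDict (K : List String) : ∀ (d : PySem.Dict String Int) (k : String),
    ((K.foldl (fun d k => d.insert k 0) d).contains k = (d.contains k || decide (k ∈ K))) ∧
    ((K.foldl (fun d k => d.insert k 0) d).getD k 0 = if k ∈ K then 0 else d.getD k 0) := by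
  induction K with
  | nil => simp
  | cons a K ih =>
    intro d k
    simp only [List.foldl_cons]
    refine ⟨?_, ?_⟩
    · rw [(ih _ k).1, PySem.Dict.contains_insert]
      by_cases hk : k = a
      · simp [hk]
      · simp [beq_eq_false_iff_ne.mpr hk, hk]
    · rw [(ih _ k).2, PySem.Dict.getD_insert]
      by_cases hK : k ∈ K <;> by_cases hk : k = a <;> simp [hK, hk]

theorem pvPassContains (l : List String) : ∀ (c : PySem.Dict String Int) (s : String),
    ((l.foldl (fun c s => if c.contains s then c.insert s (c.getD s 0 + 1) else c) c).contains s)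
      = c.contains s := by
  induction l with
  | nil => intro c s; rfl
  | cons a l ih =>
    intro c s
    simp only [List.foldl_cons]
    split_ifs with h
    · rw [ih, PySem.Dict.contains_insert]
      by_cases hs : s = a <;> simp [hs, h]
    · exact ih c s

theorem pvPassGetD (l : List String) : ∀ (c : PySem.Dict String Int) (k : String),
    c.contains k = true →
    ((l.foldl (fun c s => if c.contains s then c.insert s (c.getD s 0 + 1) else c) c).getD k 0)
      = c.getD k 0 + ((l.count k : Nat) : Int) := by
  induction l with
  | nil => intro c k _; simp
  | cons a l ih =>
    intro c k hk
    simp only [List.foldl_cons]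
    split_ifs with h
    · rw [ih _ k (by rw [PySem.Dict.contains_insert]; simp [hk]), PySem.Dict.getD_insert]
      by_cases hka : k = a
      · subst hka; simp [List.count_cons_self]; ring
      · simp [hka, List.count_cons_of_ne (by exact fun hc => hka hc.symm)]
    · have hka : k ≠ a := fun hc => by subst hc; rw [hk] at h; exact h rfl
      rw [ih _ k hk]
      simp [List.count_cons_of_ne (by exact fun hc => hka hc.symm)]

theorem pvWin_cons (D : List String) (i : Nat) (hi : i < D.length) :
    pvWin D i = D[i] :: pvMid D i := by
  unfold pvWin pvMid
  rw [← List.getElem_cons_drop hi]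
  rfl

theorem pvWin_succ (D : List String) (i : Nat) :
    pvWin D (i + 1) = pvMid D i ++ (D.drop (i + 1))[9]?.toList := by
  unfold pvWin pvMid
  exact List.take_add_one

theorem pvRemove (need : PySem.Dict String Int) (hnd : need.keys.Nodup)
    (a : String) (w : List String) (cnt : PySem.Dict String Int) (matched : Int)
    (hI : pvInv need (a :: w) cnt) (hM : matched = pvMC need (a :: w)) :
    pvInv need w (if cnt.contains a then cnt.insert a (cnt.getD a 0 - 1) else cnt) ∧
    (if cnt.contains a then
        (if cnt.getD a 0 = need.getD a 0 then matched - 1 else matched)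
      else matched) = pvMC need w := by
  obtain ⟨hc, hg⟩ := hI
  have hkeys : (need.items.map Prod.fst).Nodup := hnd
  by_cases hca : need.contains a = true
  · have hamem : a ∈ need.keys := (PySem.Dict.contains_iff_mem_keys need a).mp hca
    obtain ⟨v0, hv0⟩ : ∃ v0, need.get? a = some v0 := by
      have := PySem.Dict.contains_eq_isSome_get? (d := need) (k := a)
      rw [hca] at this
      exact Option.isSome_iff_exists.mp this.symm
    have hmem : (a, v0) ∈ need.items := PySem.Dict.mem_items_of_get?_eq_some need hv0
    have hgd : need.getD a 0 = v0 := PySem.Dict.getD_of_get?_eq_some need 0 hv0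
    have hcga : cnt.getD a 0 = ((w.count a : Nat) : Int) + 1 := by
      rw [hg a hamem, List.count_cons_self]
      push_cast; ring
    rw [hc a, hca]
    simp only [if_pos]
    refine ⟨⟨?_, ?_⟩, ?_⟩
    · intro k
      rw [PySem.Dict.contains_insert, hc k]
      by_cases hk : k = a
      · subst hk; simp [hca]
      · simp [beq_eq_false_iff_ne.mpr hk]
    · intro k hk
      rw [PySem.Dict.getD_insert]
      by_cases hka : k = a
      · subst hka; rw [if_pos rfl, hcga]; ring
      · rw [if_neg hka, hg k hk, List.count_cons_of_ne (fun hc' => hka hc'.symm)]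
    · have hflip := pvCountP_flip need.items hkeys (a, v0) hmem
        (fun kv => decide (kv.2 ≤ (((a :: w).count kv.1 : Nat) : Int)))
        (fun kv => decide (kv.2 ≤ ((w.count kv.1 : Nat) : Int)))
        (by
          intro kv _ hne
          simp only [List.count_cons_of_ne (fun hc' => hne hc'.symm)])
      unfold pvMC at hM ⊢
      rw [hflip, ← hM, hcga, hgd]
      simp only [List.count_cons_self]
      by_cases hcond : ((w.count a : Nat) : Int) + 1 = v0
      · rw [if_pos hcond]
        have h1 : ¬ v0 ≤ ((w.count a : Nat) : Int) := by omega
        have h2 : v0 ≤ ((w.count a : Nat) : Int) + 1 := by omega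
        simp [h1, h2]
        try omega
      · rw [if_neg hcond]
        have : decide (v0 ≤ ((w.count a : Nat) : Int))
             = decide (v0 ≤ (((w.count a + 1 : Nat)) : Int)) := by
          rw [decide_eq_decide]
          push_cast
          omega
        simp only [this]
        push_cast
        ring
  · have hca' : cnt.contains a = false := by rw [hc a]; simpa using hca
    have hanot : a ∉ need.keys := fun hmm => hca ((PySem.Dict.contains_iff_mem_keys need a).mpr hmm)
    rw [hca']
    simp only [Bool.false_eq_true, ite_false]
    refine ⟨⟨hc, ?_⟩, ?_⟩
    · intro k hk
      have hka : k ≠ a := fun hc' => hanot (hc' ▸ hk)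
      rw [hg k hk, List.count_cons_of_ne (fun hc' => hka hc'.symm)]
    · rw [hM]
      unfold pvMC
      norm_cast
      apply pvCountP_same
      intro kv hkv
      have : kv.1 ≠ a := by
        intro hc'
        exact hanot (hc' ▸ PySem.Dict.mem_keys_of_mem_items need hkv)
      rw [List.count_cons_of_ne (fun hc' => this hc'.symm)]

theorem pvAdd (need : PySem.Dict String Int) (hnd : need.keys.Nodup)
    (x : String) (w : List String) (cnt : PySem.Dict String Int) (matched : Int)
    (hI : pvInv need w cnt) (hM : matched = pvMC need w) :
    pvInv need (w ++ [x]) (if cnt.contains x then cnt.insert x (cnt.getD x 0 + 1) else cnt) ∧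
    (if cnt.contains x then
        (if (cnt.insert x (cnt.getD x 0 + 1)).getD x 0 = need.getD x 0 then matched + 1 else matched)
      else matched) = pvMC need (w ++ [x]) := by
  obtain ⟨hc, hg⟩ := hI
  have hkeys : (need.items.map Prod.fst).Nodup := hnd
  have hcount : ∀ k : String, (w ++ [x]).count k = w.count k + (if x = k then 1 else 0) := by
    intro k
    rw [List.count_append]
    by_cases hk : x = k <;> simp [hk]
  by_cases hcx : need.contains x = true
  · have hxmem : x ∈ need.keys := (PySem.Dict.contains_iff_mem_keys need x).mp hcx
    obtain ⟨v0, hv0⟩ : ∃ v0, need.get? x = some v0 := by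
      have := PySem.Dict.contains_eq_isSome_get? (d := need) (k := x)
      rw [hcx] at this
      exact Option.isSome_iff_exists.mp this.symm
    have hmem : (x, v0) ∈ need.items := PySem.Dict.mem_items_of_get?_eq_some need hv0
    have hgd : need.getD x 0 = v0 := PySem.Dict.getD_of_get?_eq_some need 0 hv0
    have hnew : (cnt.insert x (cnt.getD x 0 + 1)).getD x 0 = ((w.count x : Nat) : Int) + 1 := by
      rw [PySem.Dict.getD_insert, if_pos rfl, hg x hxmem]
    rw [hc x, hcx]
    simp only [if_pos]
    refine ⟨⟨?_, ?_⟩, ?_⟩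
    · intro k
      rw [PySem.Dict.contains_insert, hc k]
      by_cases hk : k = x
      · subst hk; simp [hcx]
      · simp [beq_eq_false_iff_ne.mpr hk]
    · intro k hk
      rw [PySem.Dict.getD_insert, hcount k]
      by_cases hkx : k = x
      · subst hkx; rw [if_pos rfl, hg k hk]; simp
      · rw [if_neg hkx, if_neg (fun hc' => hkx (Eq.symm hc')), hg k hk]; simp
    · have hflip := pvCountP_flip need.items hkeys (x, v0) hmem
        (fun kv => decide (kv.2 ≤ ((w.count kv.1 : Nat) : Int)))
        (fun kv => decide (kv.2 ≤ (((w ++ [x]).count kv.1 : Nat) : Int)))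
        (by
          intro kv _ hne
          simp only [hcount kv.1, if_neg (fun hc' : x = kv.1 => hne (Eq.symm hc')), Nat.add_zero])
      unfold pvMC at hM ⊢
      rw [hflip, ← hM, hnew, hgd]
      simp only [hcount x, if_true]
      by_cases hcond : ((w.count x : Nat) : Int) + 1 = v0
      · rw [if_pos hcond]
        have h1 : ¬ v0 ≤ ((w.count x : Nat) : Int) := by omega
        have h2 : v0 ≤ ((w.count x : Nat) : Int) + 1 := by omega
        simp [h1, h2]
        try omega
      · rw [if_neg hcond]
        have : decide (v0 ≤ (((w.count x + 1 : Nat)) : Int))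
             = decide (v0 ≤ ((w.count x : Nat) : Int)) := by
          rw [decide_eq_decide]
          push_cast
          omega
        simp only [this]
        ring
  · have hcx' : cnt.contains x = false := by rw [hc x]; simpa using hcx
    have hxnot : x ∉ need.keys := fun hmm => hcx ((PySem.Dict.contains_iff_mem_keys need x).mpr hmm)
    rw [hcx']
    simp only [Bool.false_eq_true, ite_false]
    refine ⟨⟨hc, ?_⟩, ?_⟩
    · intro k hk
      have hkx : x ≠ k := fun hc' => hxnot (hc' ▸ hk)
      rw [hg k hk, hcount k, if_neg hkx]
      simp
    · rw [hM]
      unfold pvMC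
      norm_cast
      apply pvCountP_same
      intro kv hkv
      have : x ≠ kv.1 := by
        intro hc'
        exact hxnot (hc' ▸ PySem.Dict.mem_keys_of_mem_items need hkv)
      simp only [hcount kv.1, if_neg this, Nat.add_zero]

theorem pvStep (need : PySem.Dict String Int) (D : List String)
    (hnd : need.keys.Nodup) (i : Nat) (hi : i < D.length)
    (cnt : PySem.Dict String Int) (matched answer : Int)
    (hC : pvInv need (pvWin D i) cnt) (hM : matched = pvMC need (pvWin D i)) :
    ∃ cnt₂, solAltStep need D (D.length : Int) (cnt, matched, answer) ((i : Int) + 1) =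
      (cnt₂, pvMC need (pvWin D (i + 1)),
        if pvMC need (pvWin D (i + 1)) = (need.items.length : Int) then answer + 1 else answer) ∧
      pvInv need (pvWin D (i + 1)) cnt₂ := by
  have hout : PySem.List.pyGetD D ((i : Int) + 1 - 1) "" = D[i] := by
    have h' : (i : Int) + 1 - 1 = ((i : Nat) : Int) := by ring
    rw [h', PySem.List.pyGetD_natCast, List.getD_eq_getElem _ _ hi]
  rw [pvWin_cons D i hi] at hC hM
  obtain ⟨hrI, hrM⟩ := pvRemove need hnd (D[i]) (pvMid D i) cnt matched hC hM
  set cnt₁ := (if cnt.contains D[i] then cnt.insert D[i] (cnt.getD D[i] 0 - 1) else cnt) with hcnt1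
  set m₁ := (if cnt.contains D[i] then (if cnt.getD D[i] 0 = need.getD D[i] 0 then matched - 1 else matched) else matched) with hm1
  have hp1 : (if cnt.contains D[i] then
      (cnt.insert D[i] (cnt.getD D[i] 0 - 1),
       if cnt.getD D[i] 0 = need.getD D[i] 0 then matched - 1 else matched)
      else (cnt, matched)) = (cnt₁, m₁) := by
    by_cases hcc : cnt.contains D[i] <;> simp [hcnt1, hm1, hcc]
  by_cases hlt : i + 10 < D.length
  · have hx : PySem.List.pyGetD D ((i : Int) + 1 + 9) "" = D[i + 10] := by
      have h' : (i : Int) + 1 + 9 = ((i + 10 : Nat) : Int) := by push_cast; ring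
      rw [h', PySem.List.pyGetD_natCast, List.getD_eq_getElem _ _ hlt]
    have h19 : i + 1 + 9 < D.length := by omega
    have hgc : D[i + 1 + 9]'h19 = D[i + 10]'hlt := by congr 1
    have hwin1 : pvWin D (i + 1) = pvMid D i ++ [D[i + 10]] := by
      rw [pvWin_succ D i, List.getElem?_drop, List.getElem?_eq_getElem h19, hgc]
      rfl
    obtain ⟨haI, haM⟩ := pvAdd need hnd (D[i + 10]) (pvMid D i) cnt₁ m₁ hrI hrM
    set cnt₂ := (if cnt₁.contains D[i + 10] then cnt₁.insert (D[i + 10]) (cnt₁.getD (D[i + 10]) 0 + 1) else cnt₁) with hcnt2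
    set m₂ := (if cnt₁.contains D[i + 10] then
        (if (cnt₁.insert (D[i + 10]) (cnt₁.getD (D[i + 10]) 0 + 1)).getD (D[i + 10]) 0 = need.getD (D[i + 10]) 0 then m₁ + 1 else m₁)
      else m₁) with hm2
    have hp2 : (if cnt₁.contains D[i + 10] then
        (cnt₁.insert (D[i + 10]) (cnt₁.getD (D[i + 10]) 0 + 1),
         if (cnt₁.insert (D[i + 10]) (cnt₁.getD (D[i + 10]) 0 + 1)).getD (D[i + 10]) 0 = need.getD (D[i + 10]) 0 then m₁ + 1 else m₁)
        else (cnt₁, m₁)) = (cnt₂, m₂) := by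
      by_cases hcc : cnt₁.contains D[i + 10] <;> simp [hcnt2, hm2, hcc]
    refine ⟨cnt₂, ?_, ?_⟩
    · simp only [solAltStep]
      rw [hout, hp1]
      rw [if_pos (show (i : Int) + 1 + 9 < (D.length : Int) by omega)]
      rw [hx, hp2, hwin1, ← haM]
    · rw [hwin1]
      exact haI
  · have hwin1 : pvWin D (i + 1) = pvMid D i := by
      rw [pvWin_succ D i, List.getElem?_eq_none (by simp; omega), Option.toList_none,
        List.append_nil]
    refine ⟨cnt₁, ?_, ?_⟩
    · simp only [solAltStep]
      rw [hout, hp1]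
      rw [if_neg (show ¬ ((i : Int) + 1 + 9 < (D.length : Int)) by omega)]
      rw [hwin1, ← hrM]
    · rw [hwin1]
      exact hrI

theorem pvLoop (need : PySem.Dict String Int) (D : List String) (hnd : need.keys.Nodup) :
    ∀ (m i : Nat), i + 1 + m = D.length →
    ∀ (cnt : PySem.Dict String Int) (matched answer : Int),
      pvInv need (pvWin D i) cnt → matched = pvMC need (pvWin D i) →
      ((PySem.List.pyRange ((i : Int) + 1) (D.length : Int) 1).foldl
        (solAltStep need D (D.length : Int)) (cnt, matched, answer)).2.2 =
      answer + ((List.range' (i + 1) m).countP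
        (fun j => decide (pvMC need (pvWin D j) = (need.items.length : Int))) : Int) := by
  intro m
  induction m with
  | zero =>
    intro i hlen cnt matched answer hI hM
    rw [PySem.List.pyRange_one_eq_nil (by omega : (D.length : Int) ≤ (i : Int) + 1)]
    simp
  | succ m ih =>
    intro i hlen cnt matched answer hI hM
    have hi : i < D.length := by omega
    rw [PySem.List.pyRange_one_cons (by omega : (i : Int) + 1 < (D.length : Int))]
    obtain ⟨cnt₂, heq, hI2⟩ := pvStep need D hnd i hi cnt matched answer hI hM
    rw [List.foldl_cons, heq,
      show (i : Int) + 1 + 1 = ((i + 1 : Nat) : Int) + 1 by push_cast; ring,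
      ih (i + 1) (by omega) cnt₂ _ _ hI2 rfl,
      List.range'_succ, List.countP_cons]
    by_cases hok : pvMC need (pvWin D (i + 1)) = (need.items.length : Int)
    · simp [hok]; ring
    · simp [hok]

theorem pvNeedNodup (want : List String) (number : List Int) :
    ((want.zip number).foldl (fun d kv => d.insert kv.1 kv.2)
      (PySem.Dict.empty : PySem.Dict String Int)).keys.Nodup := by
  exact PySem.Dict.nodup_keys_foldl_insert_key (want.zip number) Prod.fst
    (fun _ kv => kv.2) PySem.Dict.empty (PySem.Dict.nodup_keys_empty)

theorem pvAllCount (l : List (String × Int)) (p : String × Int → Bool) :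
    l.all p = decide ((l.countP p : Int) = (l.length : Int)) := by
  rw [Bool.eq_iff_iff]
  simp only [List.all_eq_true, decide_eq_true_eq, Nat.cast_inj, List.countP_eq_length]

theorem solution_eq_countP (want : List String) (number : List Int) (discount : List String) :
    solution want number discount =
      ((List.range discount.length).countP
        (fun j => decide (pvMC ((want.zip number).foldl (fun d kv => d.insert kv.1 kv.2) PySem.Dict.empty) (pvWin discount j)
          = (((want.zip number).foldl (fun d kv => d.insert kv.1 kv.2) PySem.Dict.empty : PySem.Dict String Int).items.length : Int))) : Int) := by
  unfold solution
  set d : PySem.Dict String Int :=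
    (want.zip number).foldl (fun d kv => d.insert kv.1 kv.2) PySem.Dict.empty with hd
  simp only [PySem.List.len_eq]
  rw [PySem.List.pyRange_zero_nat discount.length, List.foldl_map,
    PySem.List.foldl_ite_add_one, zero_add]
  norm_cast
  apply List.countP_congr
  intro j _
  have hslice : PySem.List.slice discount (some ((j : Nat) : Int)) (some ((j + 10 : Nat) : Int))
      = pvWin discount j := by
    rw [PySem.List.slice_natCast]
    unfold pvWin
    congr 1
    omega
  have hstep : ∀ kv ∈ d.items,
      (fun kv => decide (d.getD kv.1 0 ≤ (PySem.Dict.counter (pvWin discount j)).getD kv.1 0)) kv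
      = (fun kv => decide (kv.2 ≤ (((pvWin discount j).count kv.1 : Nat) : Int))) kv := by
    intro kv hkv
    simp only
    rw [PySem.Dict.getD_counter, PySem.Dict.getD_of_mem_items d
      (show (kv.1, kv.2) ∈ d.items by simpa using hkv) (pvNeedNodup want number)]
  rw [hslice, checkItemsA_eq_all, pvAllCount]
  simp only [decide_eq_true_eq]
  unfold pvMC
  rw [← pvCountP_same d.items _ _ hstep]

theorem solution_alt_eq_countP (want : List String) (number : List Int) (discount : List String) :
    solution_alt want number discount =
      ((List.range discount.length).countP
        (fun j => decide (pvMC ((want.zip number).foldl (fun d kv => d.insert kv.1 kv.2) PySem.Dict.empty) (pvWin discount j)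
          = (((want.zip number).foldl (fun d kv => d.insert kv.1 kv.2) PySem.Dict.empty : PySem.Dict String Int).items.length : Int))) : Int) := by
  unfold solution_alt
  set need : PySem.Dict String Int :=
    (want.zip number).foldl (fun d kv => d.insert kv.1 kv.2) PySem.Dict.empty with hneed
  have hnd : need.keys.Nodup := pvNeedNodup want number
  simp only [PySem.List.len_eq]
  have hslice : PySem.List.slice discount none (some 10) = pvWin discount 0 := by
    rw [PySem.List.slice_to discount (by norm_num : (0 : Int) ≤ 10)]
    unfold pvWin
    simp
  rw [hslice]
  set cnt0 : PySem.Dict String Int :=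
    need.keys.foldl (fun d k => d.insert k 0) PySem.Dict.empty with hcnt0
  set cnt1 := (pvWin discount 0).foldl
    (fun c s => if c.contains s then c.insert s (c.getD s 0 + 1) else c) cnt0 with hcnt1
  have hc0c : ∀ k, cnt0.contains k = need.contains k := by
    intro k
    rw [hcnt0, (pvInitDict need.keys PySem.Dict.empty k).1]
    simp [PySem.Dict.contains_eq_decide_mem_keys]
  have hI1 : pvInv need (pvWin discount 0) cnt1 := by
    constructor
    · intro k
      rw [hcnt1, pvPassContains, hc0c]
    · intro k hk
      rw [hcnt1, pvPassGetD _ _ _ (by rw [hc0c]; exact (PySem.Dict.contains_iff_mem_keys need k).mpr hk),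
        hcnt0, (pvInitDict need.keys PySem.Dict.empty k).2, if_pos hk, zero_add]
  set M : Int := need.items.foldl (fun acc kv => if cnt1.getD kv.1 0 ≥ kv.2 then acc + 1 else acc) 0 with hMdef
  have hm : M = pvMC need (pvWin discount 0) := by
    rw [hMdef, PySem.List.foldl_ite_add_one, zero_add]
    unfold pvMC
    norm_cast
    apply pvCountP_same
    intro kv hkv
    simp only [ge_iff_le]
    rw [hI1.2 kv.1 (PySem.Dict.mem_keys_of_mem_items need hkv)]
  by_cases hn : discount.length = 0
  · simp only [hn]
    rw [PySem.List.pyRange_one_eq_nil (by norm_num : ((0 : Nat) : Int) ≤ 1)]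
    simp
  · have hpos : 0 < discount.length := by omega
    have hloop := pvLoop need discount hnd (discount.length - 1) 0 (by omega) cnt1 M
      (if 0 < (discount.length : Int) ∧ M = (need.items.length : Int) then 1 else 0) hI1 hm
    simp only [Nat.cast_zero, zero_add] at hloop
    refine hloop.trans ?_
    rw [hm]
    rw [show discount.length = (discount.length - 1) + 1 from by omega, List.range_eq_range',
      List.range'_succ, List.countP_cons]
    simp only [Nat.zero_add]
    by_cases hok : pvMC need (pvWin discount 0) = (need.items.length : Int)
    · rw [if_pos ⟨by omega, hok⟩]
      simp [hok]
      ring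
    · rw [if_neg (by intro h; exact hok h.2)]
      simp [hok]

-- ===== VERDICT (by name: the statement is the Claim_ definition above) =====
theorem solution_spec : Claim_equal_solution := by
  intro want number discount _
  unfold Spec_solution
  rw [solution_eq_countP, solution_alt_eq_countP]
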